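-- pv_equiv track=rewrite | github.com/alertlogic/alertlogic-sdk-python | setup.py | aggregate_release
-- ===== SOURCE A (Python) =====
-- def aggregate_release(lns, acc):
--     cut = lns[0:3]
--     rest = lns[4:]
--     if not lns:
--         return acc
--     tag = cut[0].strip()
--     date = cut[1].strip()
--     subject = cut[2].strip()
--     rel_acc = acc.get(tag, [])
--     rel_acc.append(f"* {date} - {subject}")
--     acc[tag] = rel_acc
--     return aggregate_release(rest, acc)
-- ===== SOURCE B (Python) =====
-- def aggregate_release(lns, acc):
--     i = 0
--     n = len(lns)
--     while i < n:
--         tag = lns[i].strip()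
--         date = lns[i + 1].strip()
--         subject = lns[i + 2].strip()
--         rel_acc = acc.get(tag, [])
--         rel_acc.append(f"* {date} - {subject}")
--         acc[tag] = rel_acc
--         i += 4
--     return acc
-- ===== Notes on version B (the rewrite author's own statement) =====
-- stated objective: simpler
-- what changed: Replaces A's tail recursion with repeated slicing (lns[0:3], lns[4:] allocate fresh lists each step) by a single index loop stepping i by 4 over the original list; no slices or recursion.
import Mathlib
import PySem

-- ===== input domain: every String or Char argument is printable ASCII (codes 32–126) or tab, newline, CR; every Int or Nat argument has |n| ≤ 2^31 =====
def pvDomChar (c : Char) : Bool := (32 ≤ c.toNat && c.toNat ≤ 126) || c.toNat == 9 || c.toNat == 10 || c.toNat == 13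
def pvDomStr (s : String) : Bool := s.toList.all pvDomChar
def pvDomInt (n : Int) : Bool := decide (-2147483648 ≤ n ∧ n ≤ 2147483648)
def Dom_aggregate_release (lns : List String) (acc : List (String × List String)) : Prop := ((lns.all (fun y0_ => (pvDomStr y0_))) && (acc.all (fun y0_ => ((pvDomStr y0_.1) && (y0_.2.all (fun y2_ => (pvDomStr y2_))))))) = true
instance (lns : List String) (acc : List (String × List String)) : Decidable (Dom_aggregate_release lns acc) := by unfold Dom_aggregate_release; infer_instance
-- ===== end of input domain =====

-- B replaces A's tail recursion over fresh slices by a single index loop stepping by 4 over the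
-- original list (simpler; same return value). Both A and B mutate acc in place identically in
-- Python; the theorems here are about the returned dict.

-- ===== PORT A =====
-- literal transliteration of A's slice-and-recurse; the `.getD ""` on pyGet? only totalises the
-- out-of-range case (Python's IndexError), excluded by Pre_.
def aggA (lns : List String) (d : PySem.Dict String (List String)) :
    PySem.Dict String (List String) :=
  let cut := PySem.List.slice lns (some 0) (some 3)
  let rest := PySem.List.slice lns (some 4) none
  if lns = [] then d
  else
    let tag := PySem.Str.strip ((PySem.List.pyGet? cut 0).getD "")
    let date := PySem.Str.strip ((PySem.List.pyGet? cut 1).getD "")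
    let subject := PySem.Str.strip ((PySem.List.pyGet? cut 2).getD "")
    let rel_acc := d.getD tag []
    aggA rest (d.insert tag (rel_acc ++ ["* " ++ date ++ " - " ++ subject]))
termination_by lns.length
decreasing_by
  simp only [PySem.List.slice_from _ (by norm_num : (0:Int) ≤ 4)]
  have : lns.length ≠ 0 := by simpa using ‹¬ lns = []›
  simp only [List.length_drop]
  omega

def aggregate_release (lns : List String) (acc : List (String × List String)) :
    List (String × List String) :=
  (aggA lns (PySem.Dict.mk acc)).items

-- ===== PORT B =====
-- literal transliteration of B's while-loop over the index i (step 4)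
def aggBGo (lns : List String) (i : Nat) (d : PySem.Dict String (List String)) :
    PySem.Dict String (List String) :=
  if i < lns.length then
    let tag := PySem.Str.strip ((PySem.List.pyGet? lns (i : Int)).getD "")
    let date := PySem.Str.strip ((PySem.List.pyGet? lns ((i : Int) + 1)).getD "")
    let subject := PySem.Str.strip ((PySem.List.pyGet? lns ((i : Int) + 2)).getD "")
    let rel_acc := d.getD tag []
    aggBGo lns (i + 4) (d.insert tag (rel_acc ++ ["* " ++ date ++ " - " ++ subject]))
  else d
termination_by lns.length - i

def aggregate_release_alt (lns : List String) (acc : List (String × List String)) :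
    List (String × List String) :=
  (aggBGo lns 0 (PySem.Dict.mk acc)).items

-- ===== PRECONDITION & SPEC =====
-- Pre_ excludes exactly the inputs on which Python A raises IndexError (a trailing chunk of
-- length 1 or 2); Python B raises there as well.
def Pre_aggregate_release (lns : List String) (acc : List (String × List String)) : Prop :=
  lns.length % 4 = 0 ∨ lns.length % 4 = 3
instance (lns : List String) (acc : List (String × List String)) :
    Decidable (Pre_aggregate_release lns acc) := by unfold Pre_aggregate_release; infer_instance

def pvWitness_aggregate_release : List String × (List (String × List String)) :=
  (["v1.0 ", " 2020-01-01", " fix bug ", "", "v1.1", "2020-02-02", "add feature"],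
   [("v1.0", ["* old - entry"])])

def Spec_aggregate_release (lns : List String) (acc : List (String × List String)) (out : List (String × List String)) : Prop := out = aggregate_release_alt lns acc
instance (lns : List String) (acc : List (String × List String)) (out : List (String × List String)) : Decidable (Spec_aggregate_release lns acc out) := by unfold Spec_aggregate_release; infer_instance

-- ===== CLAIM (what is proved, stated in full; the proofs are below) =====
def Claim_equal_aggregate_release : Prop := ∀ (lns : List String) (acc : List (String × List String)), Dom_aggregate_release lns acc → Pre_aggregate_release lns acc → Spec_aggregate_release lns acc (aggregate_release lns acc)

-- ===== LEMMAS AND PROOFS =====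

-- the two loop bodies read the same three lines: A reads (lns.drop i).take 3 at 0,1,2,
-- B reads lns at i, i+1, i+2; equal even out of range (both give none → "")
lemma read_eq (lns : List String) (i k : Nat) (hk : k < 3) :
    PySem.List.pyGet? (PySem.List.slice (lns.drop i) (some 0) (some 3)) (k : Int)
      = PySem.List.pyGet? lns ((i : Int) + (k : Int)) := by
  have h4 : ((i : Int) + (k : Int)) = ((i + k : Nat) : Int) := by push_cast; ring
  rw [h4]
  simp only [PySem.List.slice_zero_start, PySem.List.slice_to _ (by norm_num : (0:Int) ≤ 3),
    PySem.List.pyGet?_natCast]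
  rw [List.getElem?_take_of_lt (show k < (3:Int).toNat from hk), List.getElem?_drop]

lemma agree (lns : List String) : ∀ i d, aggA (lns.drop i) d = aggBGo lns i d := by
  have key : ∀ n i d, lns.length - i ≤ n → aggA (lns.drop i) d = aggBGo lns i d := by
    intro n
    induction n with
    | zero =>
      intro i d hle
      have hnil : lns.drop i = [] := List.drop_eq_nil_iff.mpr (by omega)
      rw [aggA.eq_def, aggBGo.eq_def, hnil]
      simp only [if_neg (by omega : ¬ i < lns.length), if_true]
    | succ n ihn =>
      intro i d hle
      by_cases h : i < lns.length
      · have hne : lns.drop i ≠ [] := by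
          simp only [ne_eq, List.drop_eq_nil_iff]; omega
        rw [aggA.eq_def, aggBGo.eq_def]
        simp only [if_neg hne, if_pos h]
        have h0 := read_eq lns i 0 (by omega)
        have h1 := read_eq lns i 1 (by omega)
        have h2 := read_eq lns i 2 (by omega)
        simp only [Nat.cast_zero, add_zero, Nat.cast_one, Nat.cast_ofNat] at h0 h1 h2
        rw [h0, h1, h2]
        have hrest : PySem.List.slice (lns.drop i) (some 4) none = lns.drop (i + 4) := by
          rw [PySem.List.slice_from _ (by norm_num : (0:Int) ≤ 4)]
          simp only [List.drop_drop]
          rfl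
        rw [hrest]
        exact ihn (i + 4) _ (by omega)
      · have hnil : lns.drop i = [] := List.drop_eq_nil_iff.mpr (Nat.le_of_not_lt h)
        rw [aggA.eq_def, aggBGo.eq_def, hnil]
        simp [h]
  intro i d
  exact key lns.length i d (by omega)

-- ===== VERDICT (by name: the statement is the Claim_ definition above) =====
theorem aggregate_release_spec : Claim_equal_aggregate_release := by
  intro lns acc _ _
  unfold Spec_aggregate_release aggregate_release aggregate_release_alt
  rw [← agree lns 0 (PySem.Dict.mk acc), List.drop_zero]
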